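-- pv_equiv track=rewrite | github.com/isudox/nerd-algo | python-algorithm/leetcode/problem_2018.py | placeWordInCrossword
-- ===== SOURCE A (Python) =====
-- from typing import List
--
-- def placeWordInCrossword(board: List[List[str]], word: str) -> bool:
--     def check(pos: int, lo: int, hi: int, mode: bool) -> bool:
--         valid = True
--         for i in range(lo, hi):
--             if mode:  # row mode
--                 val = board[pos][i]
--             else:
--                 val = board[i][pos]
--             if val == ' ' or val == word[i - lo]:
--                 continue
--             valid = False
--         if valid:
--             return True
--         for i in range(lo, hi):
--             if mode:  # row mode
--                 val = board[pos][i]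
--             else:
--                 val = board[i][pos]
--             if val == ' ' or val == reverse_word[i - lo]:
--                 continue
--             return False
--         return True
--
--     m, n, size = len(board), len(board[0]), len(word),
--     reverse_word = word[::-1]
--     if size > max(m, n):
--         return False
--     for r, row in enumerate(board):
--         if n < size:
--             break
--         start = -1
--         for i in range(n):
--             if row[i] == '#':
--                 if i - 1 - start == size and check(r, start + 1, i, True):
--                     return True
--                 start = i
--             elif i == n - 1:
--                 if i - start == size and check(r, start + 1, i + 1, True):
--                     return True
--                 start = i
--     for j in range(n):
--         if m < size:
--             break
--         start = -1
--         for i in range(m):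
--             if board[i][j] == '#':
--                 if i - 1 - start == size and check(j, start + 1, i, False):
--                     return True
--                 start = i
--             elif i == m - 1:
--                 if i - start == size and check(j, start + 1, i + 1, False):
--                     return True
--                 start = i
--     return False
-- ===== SOURCE B (Python) =====
-- from typing import List
--
-- def placeWordInCrossword(board: List[List[str]], word: str) -> bool:
--     # B: split every row and column of the common-width grid into '#'-separated
--     # cell segments, then match each segment of the right length against word or
--     # reversed word, treating ' ' cells as wildcards.
--     def segments(line):
--         segs, cur = [], []
--         for c in line:
--             if c == '#':
--                 segs.append(cur)
--                 cur = []
--             else: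
--                 cur.append(c)
--         segs.append(cur)
--         return segs
--
--     width = min((len(row) for row in board), default=0)
--     w = list(word)
--     cands = [w, w[::-1]]
--     lines = [row[:width] for row in board] + [list(col) for col in zip(*board)]
--     return any(
--         len(seg) == len(cand) and all(c == ' ' or c == ch for c, ch in zip(seg, cand))
--         for line in lines
--         for seg in segments(line)
--         for cand in cands
--     )
-- ===== Notes on version B (the rewrite author's own statement) =====
-- stated objective: simpler
-- what changed: B replaces A's inline start-index scanning with forward/backward check helper by a split-into-'#'-separated-segments decomposition: build all row and column cell segments of the common-width grid, then match each against word or reversed word with ' ' as wildcard.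
-- outside the precondition, e.g. on placeWordInCrossword([['a', 'b'], ['c', '#']], ''): A returns False, B returns True; on placeWordInCrossword([[' ', ' '], ['c']], 'ab'): A returns True, B returns False
import Mathlib
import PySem

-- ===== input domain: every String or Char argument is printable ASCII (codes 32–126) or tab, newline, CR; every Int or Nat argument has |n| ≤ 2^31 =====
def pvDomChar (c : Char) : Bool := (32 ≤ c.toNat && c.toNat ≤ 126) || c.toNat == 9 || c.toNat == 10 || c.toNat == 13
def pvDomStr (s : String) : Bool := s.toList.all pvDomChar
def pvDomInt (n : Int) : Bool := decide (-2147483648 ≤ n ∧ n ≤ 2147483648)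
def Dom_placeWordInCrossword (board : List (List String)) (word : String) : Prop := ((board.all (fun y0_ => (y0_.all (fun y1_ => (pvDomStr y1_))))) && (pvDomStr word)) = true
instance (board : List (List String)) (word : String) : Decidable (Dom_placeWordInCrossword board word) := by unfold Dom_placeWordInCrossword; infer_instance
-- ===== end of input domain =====

-- B replaces A's inline start-index scanning (with its forward/backward check helper) by
-- a split-into-'#'-separated-segments decomposition over all rows and columns; same cost, simpler.


-- ===== PORT A =====
-- A's nested helper check(pos, lo, hi, mode): first loop computes 'valid' (forward match),
-- second loop early-returns False at the first reverse mismatch, else True.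
-- the cell read `board[pos][i]` / `board[i][pos]` selected by A's `mode` flag
def pvValA (board : List (List String)) (pos : Nat) (mode : Bool) (i : Int) : String :=
  if mode then (board.getD pos []).getD i.toNat "" else (board.getD i.toNat []).getD pos ""

def pvCheckA (board : List (List String)) (W RW : List Char) (pos : Nat) (lo hi : Int) (mode : Bool) : Bool :=
  let idxs : List Int := (List.range (hi - lo).toNat).map (fun k : Nat => lo + (k : Int))
  let valid := idxs.all (fun i => pvValA board pos mode i == " " || pvValA board pos mode i == String.mk [W.getD (i - lo).toNat ' '])
  if valid then true
  else idxs.all (fun i => pvValA board pos mode i == " " || pvValA board pos mode i == String.mk [RW.getD (i - lo).toNat ' '])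

-- A's inner scanning loop over the indices of one row (mode = true) or column (mode = false),
-- carrying the 'start' index (-1 initially, index of the last '#' / checked slot end otherwise).
def pvGoA (board : List (List String)) (W RW : List Char) (size pos n : Nat) (mode : Bool) :
    List Nat → Int → Bool
  | [], _ => false
  | i :: rest, start =>
    let c := pvValA board pos mode (i : Int)
    if c = "#" then
      if ((i : Int) - 1 - start == (size : Int)) && pvCheckA board W RW pos (start + 1) (i : Int) mode then
        true
      else pvGoA board W RW size pos n mode rest (i : Int)
    else if i = n - 1 then
      if ((i : Int) - start == (size : Int)) && pvCheckA board W RW pos (start + 1) ((i : Int) + 1) mode then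
        true
      else pvGoA board W RW size pos n mode rest (i : Int)
    else pvGoA board W RW size pos n mode rest start

def placeWordInCrossword (board : List (List String)) (word : String) : Bool :=
  let m := board.length
  let n := (board.headD []).length
  let W := word.toList
  let size := W.length
  let RW := W.reverse
  if size > max m n then false
  else
    -- 'if n < size: break' at the top of the row loop skips the whole loop; same for columns
    let rows := if n < size then false
      else (List.range m).any (fun r => pvGoA board W RW size r n true (List.range n) (-1))
    let cols := if m < size then false
      else (List.range n).any (fun j => pvGoA board W RW size j m false (List.range m) (-1))
    rows || cols

-- ===== PORT B =====
-- B's segments(line): split the list of cells on cells equal to "#" (with trailing segment).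
def pvSegs : List String → List String → List (List String)
  | [], cur => [cur]
  | c :: rest, cur => if c = "#" then cur :: pvSegs rest [] else pvSegs rest (cur ++ [c])

-- B's per-segment candidate match: right length, and cell-by-cell equal with ' ' as wildcard.
def pvMatch (seg : List String) (cand : List Char) : Bool :=
  (seg.length == cand.length) && (seg.zip cand).all (fun p => p.1 == " " || p.1 == String.mk [p.2])

-- Python's zip(*board): columns up to the shortest row.
def pvZipStar (b : List (List String)) : List (List String) :=
  let k := ((b.map List.length).min?).getD 0
  (List.range k).map (fun j => b.map (fun row => row.getD j ""))

-- min(len(row) for row in board) with default 0: the grid's common width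
def pvWidth (b : List (List String)) : Nat := ((b.map List.length).min?).getD 0

def placeWordInCrossword_alt (board : List (List String)) (word : String) : Bool :=
  let w := word.toList
  let cands := [w, w.reverse]
  let width := pvWidth board
  let lines := (board.map (fun row => row.take width)) ++ pvZipStar board
  lines.any (fun line => (pvSegs line []).any (fun seg => cands.any (fun cand => pvMatch seg cand)))

-- ===== PRECONDITION & SPEC =====
-- Pre_ excludes: the empty board (A raises IndexError on board[0]); ragged boards with a row
-- shorter than row 0 unless the word is too long for both dimensions (A indexes board[i][j] with
-- j < len(board[0]) and can raise IndexError there, and where it happens to return before reaching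
-- the short row its value is an accident of scan order); and the empty word, on which A's hits
-- depend on its scanner never checking the empty slot after a trailing '#' — a corner no one
-- would specify; B naturally treats every zero-length slot alike.
def Pre_placeWordInCrossword (board : List (List String)) (word : String) : Prop :=
  board ≠ [] ∧ word ≠ "" ∧
    ((∀ row ∈ board, (board.headD []).length ≤ row.length) ∨
     (board.length < word.toList.length ∧ (board.headD []).length < word.toList.length))

instance (board : List (List String)) (word : String) : Decidable (Pre_placeWordInCrossword board word) := by
  unfold Pre_placeWordInCrossword; infer_instance

def pvWitness_placeWordInCrossword : List (List String) × String := ([["a", "#"], [" ", "b"]], "ab")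

def Spec_placeWordInCrossword (board : List (List String)) (word : String) (out : Bool) : Prop := out = placeWordInCrossword_alt board word
instance (board : List (List String)) (word : String) (out : Bool) : Decidable (Spec_placeWordInCrossword board word out) := by unfold Spec_placeWordInCrossword; infer_instance

-- ===== CLAIM (what is proved, stated in full; the proofs are below) =====
def Claim_equal_placeWordInCrossword : Prop := ∀ (board : List (List String)) (word : String), Dom_placeWordInCrossword board word → Pre_placeWordInCrossword board word → Spec_placeWordInCrossword board word (placeWordInCrossword board word)

-- ===== LEMMAS AND PROOFS =====

theorem placeWordInCrossword_witness_ok :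
    Dom_placeWordInCrossword pvWitness_placeWordInCrossword.1 pvWitness_placeWordInCrossword.2 ∧
    Pre_placeWordInCrossword pvWitness_placeWordInCrossword.1 pvWitness_placeWordInCrossword.2 := by
  constructor
  · decide
  · refine ⟨by decide, by decide, Or.inl ?_⟩
    intro row hrow
    fin_cases hrow <;> decide

-- combined forward/backward match of one segment, the common value of A's check and B's inner any
def pvM (w rw : List Char) (seg : List String) : Bool := pvMatch seg w || pvMatch seg rw

-- every segment produced by pvSegs is at most cur plus the rest of the line long
theorem pvSegs_length_le (l : List String) : ∀ (cur seg : List String),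
    seg ∈ pvSegs l cur → seg.length ≤ cur.length + l.length := by
  induction l with
  | nil => intro cur seg h; simp [pvSegs] at h; simp [h]
  | cons c rest ih =>
    intro cur seg h
    simp only [pvSegs] at h
    split at h
    · rcases List.mem_cons.mp h with h | h
      · subst h; simp
      · have := ih [] seg h
        simp only [List.length_nil, List.length_cons] at this ⊢
        omega
    · have := ih (cur ++ [c]) seg h
      simp only [List.length_append, List.length_cons, List.length_nil] at this ⊢
      omega

theorem pvMatch_short {seg : List String} {cand : List Char}
    (h : seg.length ≠ cand.length) : pvMatch seg cand = false := by
  simp [pvMatch]; intro h'; omega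

-- a line shorter than the word yields no match at all
theorem pvSegs_short (line : List String) (w : List Char)
    (h : line.length < w.length) :
    (pvSegs line []).any (fun seg => [w, w.reverse].any (fun cand => pvMatch seg cand)) = false := by
  rw [List.any_eq_false]
  intro seg hseg
  have hle := pvSegs_length_le line [] seg hseg
  simp only [List.length_nil, Nat.zero_add] at hle
  have h1 : pvMatch seg w = false := pvMatch_short (by omega)
  have h2 : pvMatch seg w.reverse = false := pvMatch_short (by simp; omega)
  simp [h1, h2]

-- zip-all over equal-length lists as an index all
theorem pvZipAll {α β : Type} (l1 : List α) (l2 : List β) (d1 : α) (d2 : β) (q : α × β → Bool)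
    (h : l1.length = l2.length) :
    (l1.zip l2).all q = (List.range l1.length).all (fun t => q (l1.getD t d1, l2.getD t d2)) := by
  rw [Bool.eq_iff_iff]
  simp only [List.all_eq_true, List.mem_range]
  constructor
  · intro H t ht
    have ht2 : t < l2.length := by omega
    have hm : (l1.getD t d1, l2.getD t d2) ∈ l1.zip l2 := by
      rw [List.mem_iff_getElem]
      refine ⟨t, by simp [h]; omega, ?_⟩
      simp [List.getElem_zip, ht, ht2]
    exact H _ hm
  · intro H x hx
    obtain ⟨i, hi, rfl⟩ := List.mem_iff_getElem.mp hx
    have hi1 : i < l1.length := by simp at hi; omega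
    have hi2 : i < l2.length := by omega
    have := H i hi1
    rw [List.getElem_zip]
    rwa [List.getD_eq_getElem _ _ hi1, List.getD_eq_getElem _ _ hi2] at this

-- A's check equals B's wildcard match of the extracted segment against word or reversed word,
-- provided the cell accessor agrees with `line` and the segment has exactly word length
theorem pvCheckA_eq (board : List (List String)) (W : List Char) (pos : Nat) (mode : Bool)
    (line : List String)
    (hcell : ∀ i : Nat, i < line.length → pvValA board pos mode (i : Int) = line.getD i "")
    (a k : Nat) (hak : a ≤ k) (hk : k ≤ line.length) (hlen : k - a = W.length) :
    pvCheckA board W W.reverse pos (a : Int) (k : Int) mode =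
      pvM W W.reverse ((line.drop a).take (k - a)) := by
  have hseglen : ((line.drop a).take (k - a)).length = k - a := by simp; omega
  have hseg : ∀ t, t < k - a →
      ((line.drop a).take (k - a)).getD t "" = line.getD (a + t) "" := by
    intro t ht
    have h1 : t < ((line.drop a).take (k - a)).length := by omega
    have h2 : a + t < line.length := by omega
    rw [List.getD_eq_getElem _ _ h1, List.getD_eq_getElem _ _ h2]
    simp [List.getElem_take, List.getElem_drop]
  have key : ∀ (cand : List Char), cand.length = k - a →
      (((List.range (((k : Int) - (a : Int)).toNat)).map (fun t : Nat => (a : Int) + (t : Int))).all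
        (fun i => pvValA board pos mode i == " " ||
          pvValA board pos mode i == String.mk [cand.getD (i - (a : Int)).toNat ' ']))
      = pvMatch ((line.drop a).take (k - a)) cand := by
    intro cand hclen
    have hcast : ((k : Int) - (a : Int)).toNat = k - a := by omega
    rw [hcast, pvMatch, hseglen, hclen]
    simp only [beq_self_eq_true, Bool.true_and]
    rw [pvZipAll _ _ "" ' ' _ (by rw [hseglen, hclen]), hseglen]
    rw [Bool.eq_iff_iff]
    simp only [List.all_eq_true]
    have hpt : ∀ t, t < k - a →
        ((pvValA board pos mode ((a : Int) + (t : Int)) == " " ||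
          pvValA board pos mode ((a : Int) + (t : Int)) ==
            String.mk [cand.getD (((a : Int) + (t : Int)) - (a : Int)).toNat ' '])
          = (((line.drop a).take (k - a)).getD t "" == " " ||
             ((line.drop a).take (k - a)).getD t "" == String.mk [cand.getD t ' '])) := by
      intro t ht
      have h1 : ((a : Int) + (t : Int)) = ((a + t : Nat) : Int) := by push_cast; ring
      have h2 : (((a : Int) + (t : Int)) - (a : Int)).toNat = t := by omega
      rw [h2, h1, hcell (a + t) (by omega), hseg t ht]
    constructor
    · intro H t htm
      have ht := List.mem_range.mp htm
      rw [← hpt t ht]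
      exact H _ (List.mem_map.mpr ⟨t, htm, rfl⟩)
    · intro H i hi
      obtain ⟨t, htm, rfl⟩ := List.mem_map.mp hi
      have ht := List.mem_range.mp htm
      rw [hpt t ht]
      exact H t htm
  have hW : W.length = k - a := hlen.symm
  have hRW : W.reverse.length = k - a := by simp [hW]
  simp only [pvCheckA]
  rw [key W hW, key W.reverse hRW, pvM]
  cases pvMatch ((line.drop a).take (k - a)) W <;> simp

-- a segment of the wrong length never matches forward or backward
theorem pvM_length_ne (W : List Char) (seg : List String) (h : seg.length ≠ W.length) :
    pvM W W.reverse seg = false := by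
  rw [pvM, pvMatch_short h, pvMatch_short (by simpa using h)]
  rfl

-- E a k = the cells line[a..k), the partial segment the scanner has gone over
theorem pvE_len (line : List String) (a k : Nat) (hak : a ≤ k) (hk : k ≤ line.length) :
    ((line.drop a).take (k - a)).length = k - a := by simp; omega

theorem pvE_snoc (line : List String) (a k : Nat) (hak : a ≤ k) (hk : k < line.length) :
    (line.drop a).take (k + 1 - a) =
      (line.drop a).take (k - a) ++ [line.getD k ""] := by
  have h1 : k + 1 - a = (k - a) + 1 := by omega
  rw [h1, List.take_succ]
  congr 1
  rw [List.getElem?_drop]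
  have h2 : a + (k - a) = k := by omega
  rw [h2, List.getElem?_eq_getElem hk, List.getD_eq_getElem _ _ hk]
  rfl

-- the main loop invariant: scanning indices [k, n) with start = a-1 computes exactly whether some
-- remaining segment (including the partial one already scanned, line[a..k)) matches
theorem pvGoA_inv (board : List (List String)) (W : List Char) (pos : Nat) (mode : Bool)
    (line : List String)
    (hcell : ∀ i : Nat, i < line.length → pvValA board pos mode (i : Int) = line.getD i "")
    (hw : W ≠ []) :
    ∀ (cnt a k : Nat), cnt = line.length - k → a ≤ k → k ≤ line.length →
      (k = line.length → a = line.length) →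
      pvGoA board W W.reverse W.length pos line.length mode (List.range' k cnt) ((a : Int) - 1) =
        (pvSegs (line.drop k) ((line.drop a).take (k - a))).any (pvM W W.reverse) := by
  intro cnt
  induction cnt with
  | zero =>
    intro a k hcnt hak hk hend
    have hkn : k = line.length := by omega
    have han : a = line.length := hend hkn
    subst hkn; subst han
    have hW0 : W.length ≠ 0 := by cases W <;> simp_all
    simp [pvGoA, pvSegs, pvM, pvMatch, List.drop_length]
    omega
  | succ cnt ih =>
    intro a k hcnt hak hk hend
    have hklt : k < line.length := by omega
    have hc := hcell k hklt
    have hdropk : line.drop k = line.getD k "" :: line.drop (k + 1) := by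
      rw [List.drop_eq_getElem_cons hklt, List.getD_eq_getElem _ _ hklt]
    rw [List.range'_succ]
    rw [hdropk]
    simp only [pvGoA]
    rw [hc]
    have ha1 : ((a : Int) - 1) + 1 = (a : Int) := by ring
    by_cases hsh : line.getD k "" = "#"
    · -- '#': A checks the slot ending here; B's pvSegs emits the current segment here
      rw [if_pos hsh]
      rw [pvSegs]  -- maybe needs simp
      rw [if_pos hsh]
      have hrec := ih (k + 1) (k + 1) (by omega) (by omega) (by omega) (by omega)
      have hrw : (k + 1 : Int) - 1 = (k : Int) := by push_cast; ring
      rw [Nat.cast_add, Nat.cast_one] at hrec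
      rw [hrw] at hrec
      have hE1 : (line.drop (k + 1)).take (k + 1 - (k + 1)) = ([] : List String) := by
        simp
      rw [hE1] at hrec
      by_cases hsz : k - a = W.length
      · have hg : (((k : Int) - 1 - ((a : Int) - 1)) == (W.length : Int)) = true := by
          simp only [beq_iff_eq]; omega
        rw [hg, ha1]
        rw [pvCheckA_eq board W pos mode line hcell a k hak (by omega) hsz]
        cases hM : pvM W W.reverse ((line.drop a).take (k - a)) <;>
          simp [hM, hrec]
      · have hg : (((k : Int) - 1 - ((a : Int) - 1)) == (W.length : Int)) = false := by
          simp only [beq_eq_false_iff_ne]; intro hcon; apply hsz; omega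
        rw [hg]
        have hM : pvM W W.reverse ((line.drop a).take (k - a)) = false :=
          pvM_length_ne W _ (by rw [pvE_len line a k hak (by omega)]; exact hsz)
        simp [hM, hrec]
    · rw [if_neg hsh]
      rw [pvSegs]
      rw [if_neg hsh]
      by_cases hlast : k = line.length - 1
      · -- last cell of the line: A's elif checks the trailing slot; B's pvSegs closes it on []
        rw [if_pos hlast]
        have hcnt0 : cnt = 0 := by omega
        subst hcnt0
        have hknext : k + 1 = line.length := by omega
        have hdropn : line.drop (k + 1) = ([] : List String) := by
          rw [hknext]; exact List.drop_length
        rw [hdropn, pvSegs]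
        have hsnoc := pvE_snoc line a k hak hklt
        rw [← hsnoc]
        by_cases hsz : k + 1 - a = W.length
        · have hg : (((k : Int) - ((a : Int) - 1)) == (W.length : Int)) = true := by
            simp only [beq_iff_eq]; omega
          rw [hg, ha1]
          have hcast : (k : Int) + 1 = ((k + 1 : Nat) : Int) := by push_cast; ring
          rw [hcast]
          rw [pvCheckA_eq board W pos mode line hcell a (k + 1) (by omega) (by omega) hsz]
          cases hM : pvM W W.reverse ((line.drop a).take (k + 1 - a)) <;>
            simp [hM, pvGoA]
        · have hg : (((k : Int) - ((a : Int) - 1)) == (W.length : Int)) = false := by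
            simp only [beq_eq_false_iff_ne]; intro hcon; apply hsz; omega
          rw [hg]
          have hM : pvM W W.reverse ((line.drop a).take (k + 1 - a)) = false :=
            pvM_length_ne W _ (by rw [pvE_len line a (k + 1) (by omega) (by omega)]; exact hsz)
          simp [hM, pvGoA]
      · -- middle cell: both sides just extend the current segment
        rw [if_neg hlast]
        have hrec := ih a (k + 1) (by omega) (by omega) (by omega) (by omega)
        have hsnoc := pvE_snoc line a k hak hklt
        rw [hsnoc] at hrec
        exact hrec

-- B's inner candidate-any equals pvM
theorem pvCands_eq (w : List Char) (seg : List String) :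
    ([w, w.reverse].any (fun cand => pvMatch seg cand)) = pvM w w.reverse seg := by
  simp [pvM]

-- any over a list = any over its indices
theorem pvAny_index {α : Type} (l : List α) (d : α) (f : α → Bool) :
    l.any f = (List.range l.length).any (fun i => f (l.getD i d)) := by
  rw [Bool.eq_iff_iff]
  simp only [List.any_eq_true, List.mem_range]
  constructor
  · rintro ⟨x, hx, hfx⟩
    obtain ⟨i, hi, rfl⟩ := List.mem_iff_getElem.mp hx
    exact ⟨i, hi, by rwa [List.getD_eq_getElem _ _ hi]⟩
  · rintro ⟨i, hi, hfi⟩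
    exact ⟨l[i], List.getElem_mem hi, by rwa [List.getD_eq_getElem _ _ hi] at hfi⟩

-- any respects pointwise equality on members
theorem pvAny_congr_mem {α : Type} (l : List α) (p q : α → Bool)
    (h : ∀ x ∈ l, p x = q x) : l.any p = l.any q := by
  induction l with
  | nil => rfl
  | cons a t ih =>
    simp only [List.any_cons]
    rw [h a (by simp), ih (fun x hx => h x (by simp [hx]))]

-- width facts
theorem pvWidth_le_head (board : List (List String)) (hb : board ≠ []) :
    pvWidth board ≤ (board.headD []).length := by
  obtain ⟨h, t, rfl⟩ := List.exists_cons_of_ne_nil hb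
  rw [pvWidth]
  cases hmin : ((h :: t).map List.length).min? with
  | none => simp at hmin
  | some w =>
    have := (List.min?_eq_some_iff.mp hmin).2 h.length (by simp)
    simpa using this

theorem pvWidth_eq (board : List (List String)) (hb : board ≠ [])
    (hall : ∀ row ∈ board, (board.headD []).length ≤ row.length) :
    pvWidth board = (board.headD []).length := by
  have hmem : (board.headD []).length ∈ board.map List.length := by
    obtain ⟨h, t, rfl⟩ := List.exists_cons_of_ne_nil hb
    simp
  have hmin : (board.map List.length).min? = some (board.headD []).length := by
    rw [List.min?_eq_some_iff]
    refine ⟨hmem, ?_⟩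
    intro b hbm
    obtain ⟨row, hrow, rfl⟩ := List.mem_map.mp hbm
    exact hall row hrow
  rw [pvWidth, hmin]
  rfl

-- every line of zip(*board) has one entry per row
theorem pvZipStar_mem_len (board : List (List String)) (line : List String)
    (h : line ∈ pvZipStar board) : line.length = board.length := by
  rw [pvZipStar] at h
  obtain ⟨j, _, rfl⟩ := List.mem_map.mp h
  simp

-- per-row value of A's scan = B's segment-any over that row
theorem pvRowA (board : List (List String)) (W : List Char) (hW : W ≠ [])
    (hall : ∀ row ∈ board, (board.headD []).length ≤ row.length)
    (r : Nat) (hr : r < board.length) :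
    pvGoA board W W.reverse W.length r (board.headD []).length true
        (List.range (board.headD []).length) (-1) =
      (pvSegs ((board.getD r []).take (board.headD []).length) []).any (pvM W W.reverse) := by
  have hmem : board.getD r [] ∈ board := by
    rw [List.getD_eq_getElem _ _ hr]; exact List.getElem_mem hr
  have hge : (board.headD []).length ≤ (board.getD r []).length := hall _ hmem
  have hlen : ((board.getD r []).take (board.headD []).length).length =
      (board.headD []).length := by
    rw [List.length_take]; omega
  have hcell : ∀ i : Nat, i < ((board.getD r []).take (board.headD []).length).length →
      pvValA board r true (i : Int) =
        ((board.getD r []).take (board.headD []).length).getD i "" := by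
    intro i hi
    have hi2 : i < (board.getD r []).length := by rw [hlen] at hi; omega
    rw [List.getD_eq_getElem _ _ hi, List.getElem_take]
    have hv : pvValA board r true (i : Int) = (board.getD r []).getD i "" := by
      simp [pvValA]
    rw [hv, List.getD_eq_getElem _ _ hi2]
  have h := pvGoA_inv board W r true ((board.getD r []).take (board.headD []).length) hcell hW
      ((board.getD r []).take (board.headD []).length).length 0 0
      (by omega) (by omega) (by omega) (by omega)
  rw [hlen] at h
  rw [List.range_eq_range']
  simpa using h

-- per-column value of A's scan = B's segment-any over that column
theorem pvColA (board : List (List String)) (W : List Char) (hW : W ≠ [])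
    (j : Nat) :
    pvGoA board W W.reverse W.length j board.length false
        (List.range board.length) (-1) =
      (pvSegs (board.map (fun row => row.getD j "")) []).any (pvM W W.reverse) := by
  have hcell : ∀ i : Nat, i < (board.map (fun row => row.getD j "")).length →
      pvValA board j false (i : Int) = (board.map (fun row => row.getD j "")).getD i "" := by
    intro i hi
    have hi' : i < board.length := by simpa using hi
    have h1 : (List.map (fun row => row.getD j "") board).getD i "" =
        board[i].getD j "" := by
      rw [List.getD_eq_getElem _ _ hi, List.getElem_map]
    rw [h1]
    simp [pvValA, List.getElem?_eq_getElem hi']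
  have h := pvGoA_inv board W j false (board.map (fun row => row.getD j "")) hcell hW
      (board.map (fun row => row.getD j "")).length 0 0 (by omega) (by omega) (by omega) (by omega)
  rw [List.length_map] at h
  rw [List.range_eq_range']
  simpa using h

-- under the precondition, zip(*board) is the list of the n columns
theorem pvZipStar_eq (board : List (List String)) (hb : board ≠ [])
    (hall : ∀ row ∈ board, (board.headD []).length ≤ row.length) :
    pvZipStar board =
      (List.range (board.headD []).length).map (fun j => board.map (fun row => row.getD j "")) := by
  have hw := pvWidth_eq board hb hall
  rw [pvZipStar]
  rw [show ((board.map List.length).min?).getD 0 = pvWidth board from rfl, hw]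

-- B's per-line predicate is pvM of each segment
theorem pvLineB (w : List Char) (line : List String) :
    ((pvSegs line []).any (fun seg => ([w, w.reverse].any (fun cand => pvMatch seg cand)))) =
      (pvSegs line []).any (pvM w w.reverse) :=
  List.any_congr rfl (fun seg => pvCands_eq w seg)

-- a too-short line contributes nothing on B's side
theorem pvLineB_short (w : List Char) (line : List String) (h : line.length < w.length) :
    (pvSegs line []).any (pvM w w.reverse) = false := by
  rw [← pvLineB, pvSegs_short line w h]

-- ===== VERDICT (by name: the statement is the Claim_ definition above) =====
theorem placeWordInCrossword_spec : Claim_equal_placeWordInCrossword := by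
  intro board word hdom hpre
  obtain ⟨hb, hwne, hbr⟩ := hpre
  have hW : word.toList ≠ [] := fun h => hwne (String.toList_eq_nil_iff.mp h)
  have hWpos : word.toList.length ≠ 0 := fun h => hW (List.eq_nil_of_length_eq_zero h)
  have hwid : pvWidth board ≤ (board.headD []).length := pvWidth_le_head board hb
  unfold Spec_placeWordInCrossword placeWordInCrossword placeWordInCrossword_alt
  simp only []
  rw [List.any_append]
  rw [List.any_congr (l₂ := board.map (fun row => row.take (pvWidth board))) rfl
        (fun line => pvLineB word.toList line)]
  rw [List.any_congr (l₂ := pvZipStar board) rfl (fun line => pvLineB word.toList line)]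
  by_cases hbig : word.toList.length > max board.length (board.headD []).length
  · rw [if_pos hbig]
    have h1 : (board.map (fun row => row.take (pvWidth board))).any
        (fun line => (pvSegs line []).any (pvM word.toList word.toList.reverse)) = false := by
      rw [List.any_eq_false]
      intro line hline
      obtain ⟨row, _, rfl⟩ := List.mem_map.mp hline
      rw [pvLineB_short _ _ (by simp only [List.length_take]; omega)]
      simp
    have h2 : (pvZipStar board).any
        (fun line => (pvSegs line []).any (pvM word.toList word.toList.reverse)) = false := by
      rw [List.any_eq_false]
      intro line hline
      rw [pvLineB_short _ _ (by rw [pvZipStar_mem_len board line hline]; omega)]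
      simp
    rw [h1, h2]
    rfl
  · rw [if_neg hbig]
    congr 1
    · -- rows part
      by_cases hrowsz : (board.headD []).length < word.toList.length
      · rw [if_pos hrowsz]
        have h1 : (board.map (fun row => row.take (pvWidth board))).any
            (fun line => (pvSegs line []).any (pvM word.toList word.toList.reverse)) = false := by
          rw [List.any_eq_false]
          intro line hline
          obtain ⟨row, _, rfl⟩ := List.mem_map.mp hline
          rw [pvLineB_short _ _ (by simp only [List.length_take]; omega)]
          simp
        rw [h1]
      · have hall : ∀ row ∈ board, (board.headD []).length ≤ row.length := by
          rcases hbr with h | h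
          · exact h
          · exact absurd h.2 hrowsz
        rw [if_neg hrowsz]
        rw [pvWidth_eq board hb hall, List.any_map, pvAny_index board []]
        exact pvAny_congr_mem _ _ _
          (fun r hr => pvRowA board _ hW hall r (List.mem_range.mp hr))
    · -- cols part
      by_cases hcolsz : board.length < word.toList.length
      · rw [if_pos hcolsz]
        have h2 : (pvZipStar board).any
            (fun line => (pvSegs line []).any (pvM word.toList word.toList.reverse)) = false := by
          rw [List.any_eq_false]
          intro line hline
          rw [pvLineB_short _ _ (by rw [pvZipStar_mem_len board line hline]; omega)]
          simp
        rw [h2]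
      · have hall : ∀ row ∈ board, (board.headD []).length ≤ row.length := by
          rcases hbr with h | h
          · exact h
          · exact absurd h.1 hcolsz
        rw [if_neg hcolsz]
        rw [pvZipStar_eq board hb hall, List.any_map]
        exact pvAny_congr_mem _ _ _ (fun j _ => pvColA board _ hW j)
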